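-- pv_equiv track=rewrite | github.com/Rahonam/algorithm-syllabus | array/count_similar_words.py | similar_words
-- ===== SOURCE A (Python) =====
-- def similar_words(arr: list):
--     """
--     Count similar words in a given array
--
--     using: iteration, dictionary
--
--     Args:
--         number: array of strings
--
--     Returns:
--         dict: a map of string to its occurence
--     """
--     word_map = {}
--     for i in arr:
--         i = i.replace(" ", "")
--         i = i.lower()
--         if i in word_map:
--             word_map[i] = word_map[i] + 1
--         else:
--             word_map[i] = 1
--
--     return word_map
-- ===== SOURCE B (Python) =====
-- def similar_words(arr: list):
--     # Partition-by-filter: normalize once, then repeatedly take the first remaining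
--     # word, count it by shrinking the list with a filter, and recurse on the rest.
--     ws = [w.replace(" ", "").lower() for w in arr]
--     word_map = {}
--     while ws:
--         head = ws[0]
--         rest = [w for w in ws if w != head]
--         word_map[head] = len(ws) - len(rest)
--         ws = rest
--     return word_map
-- ===== Notes on version B (the rewrite author's own statement) =====
-- stated objective: alternative
-- what changed: Replaces A's hash-insert counting loop by an iterative partition-by-filter: normalize all words once, then repeatedly split off all copies of the first remaining word (count = length drop of the filtered list) until the list is empty; no per-element dict lookup or increment remains.
import Mathlib
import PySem

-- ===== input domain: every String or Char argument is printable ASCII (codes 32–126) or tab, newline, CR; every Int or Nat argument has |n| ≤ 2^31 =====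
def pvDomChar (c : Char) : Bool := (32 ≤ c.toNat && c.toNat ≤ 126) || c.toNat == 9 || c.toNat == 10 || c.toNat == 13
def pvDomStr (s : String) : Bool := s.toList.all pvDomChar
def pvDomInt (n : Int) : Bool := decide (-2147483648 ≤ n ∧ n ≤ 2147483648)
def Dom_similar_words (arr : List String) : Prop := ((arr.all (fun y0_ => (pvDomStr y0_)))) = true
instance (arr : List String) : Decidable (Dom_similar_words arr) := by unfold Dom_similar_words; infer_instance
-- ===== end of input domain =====

-- B (objective: alternative, not faster): instead of A's hash-insert counting loop, B normalizes
-- once and then repeatedly splits off all copies of the first remaining word with a filter,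
-- recording count = length drop, until the list is empty.

-- ===== PORT A =====
-- normalization applied to each word: i.replace(" ", "").lower()
def swNorm (w : String) : String := PySem.Str.lower (PySem.Str.replace w " " "")

-- literal port of A: single pass building the dict, +1 on seen keys, 1 on fresh ones
def similar_words (arr : List String) : List (String × Int) :=
  (arr.foldl (fun word_map i =>
      let i := swNorm i
      if word_map.contains i then
        word_map.insert i (word_map.getD i 0 + 1)
      else
        word_map.insert i 1)
    (PySem.Dict.empty : PySem.Dict String Int)).items

-- ===== PORT B =====
-- the while loop of B: take the first word, filter out all its copies, record the length drop
def swGo : List String → List (String × Int)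
  | [] => []
  | head :: t =>
    let rest := (head :: t).filter (fun w => w != head)
    (head, ((head :: t).length : Int) - (rest.length : Int)) :: swGo rest
termination_by ws => ws.length
decreasing_by
  simp only [List.filter]
  simp only [bne_self_eq_false]
  have := List.length_filter_le (fun w => w != head) t
  simpa using Nat.lt_succ_of_le this

-- port of B: normalize once, then the partition-by-filter loop
def similar_words_alt (arr : List String) : List (String × Int) :=
  swGo (arr.map swNorm)

-- ===== PRECONDITION & SPEC =====
def Spec_similar_words (arr : List String) (out : List (String × Int)) : Prop := out = similar_words_alt arr
instance (arr : List String) (out : List (String × Int)) : Decidable (Spec_similar_words arr out) := by unfold Spec_similar_words; infer_instance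

-- ===== CLAIM =====
def Claim_equal_similar_words : Prop := ∀ (arr : List String), Dom_similar_words arr → Spec_similar_words arr (similar_words arr)

-- ===== LEMMAS AND PROOFS =====

-- A's step function is insert-of-(getD+1) unconditionally: on a fresh key getD is 0
theorem sw_step_eq :
    (fun (word_map : PySem.Dict String Int) (i : String) =>
        let i := swNorm i
        if word_map.contains i then
          word_map.insert i (word_map.getD i 0 + 1)
        else
          word_map.insert i 1)
      = fun word_map i => word_map.insert (swNorm i) (word_map.getD (swNorm i) 0 + 1) := by
  funext d i
  simp only
  split
  · rfl
  · rename_i h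
    rw [PySem.Dict.getD_of_not_contains (h := by simpa using h), zero_add]

-- A's fold over arr is the Counter of the normalized list
theorem sw_fold_eq_counter (arr : List String) :
    List.foldl (fun (d : PySem.Dict String Int) i => d.insert (swNorm i) (d.getD (swNorm i) 0 + 1))
      PySem.Dict.empty arr = PySem.Dict.counter (arr.map swNorm) := by
  rw [← PySem.Dict.foldl_insert_getD_add_one_eq_counter, List.foldl_map]

-- adding an element already present leaves the set unchanged
theorem sw_add_of_mem {s : PySem.Set String} {x : String} (h : x ∈ s) :
    s.add x = s := by
  simp [PySem.Set.add, h]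

-- folding add over a list skips the elements the accumulator already contains
theorem sw_foldl_add_filter (t : List String) (s : PySem.Set String) (h : String)
    (hh : h ∈ s) :
    List.foldl PySem.Set.add s (t.filter (fun w => w != h))
      = List.foldl PySem.Set.add s t := by
  induction t generalizing s with
  | nil => rfl
  | cons x xs ih =>
    rw [List.filter_cons]
    by_cases hx : x = h
    · subst hx
      rw [bne_self_eq_false, if_neg Bool.false_ne_true, List.foldl]
      rw [ih s hh, sw_add_of_mem hh]
    · have hb : (x != h) = true := by simpa using hx
      rw [if_pos hb, List.foldl, List.foldl]
      have hh' : h ∈ s.add x := by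
        by_cases hxs : x ∈ s
        · simpa [sw_add_of_mem hxs]
        · simp only [PySem.Set.add]
          split
          · exact hh
          · exact List.mem_append_left _ hh
      exact ih (s.add x) hh'

-- a fold starting from a::s, where a never reappears, prepends a
theorem sw_foldl_add_cons (r : List String) (a : String) (s : List String)
    (ha : ∀ x ∈ r, x ≠ a) :
    List.foldl PySem.Set.add (a :: s) r = a :: List.foldl PySem.Set.add s r := by
  induction r generalizing s with
  | nil => rfl
  | cons x xs ih =>
    have hxa : x ≠ a := ha x (by simp)
    have hstep : PySem.Set.add (a :: s) x = a :: PySem.Set.add s x := by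
      simp only [PySem.Set.add, PySem.Set.contains, List.contains_cons]
      have hb : (x == a) = false := by simpa using hxa
      rw [hb]
      simp only [Bool.false_or]
      split <;> rfl
    rw [List.foldl, hstep, ih (PySem.Set.add s x) (fun y hy => ha y (by simp [hy])), List.foldl]

-- first-occurrence dedup as a head-filter recursion
theorem sw_ofList_cons (h : String) (t : List String) :
    PySem.Set.ofList (h :: t) = h :: PySem.Set.ofList (t.filter (fun w => w != h)) := by
  have h1 : PySem.Set.ofList (h :: t)
      = List.foldl PySem.Set.add ([h] : PySem.Set String) t := by
    simp [PySem.Set.ofList, PySem.Set.add, PySem.Set.empty]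
  rw [h1, ← sw_foldl_add_filter t ([h] : PySem.Set String) h (by simp)]
  rw [sw_foldl_add_cons _ h []
      (fun x hx => by simpa using (List.mem_filter.mp hx).2)]
  rfl

-- count of a word plus the length of the list with it filtered out is the length
theorem sw_count_add_filter (l : List String) (h : String) :
    l.count h + (l.filter (fun w => w != h)).length = l.length := by
  induction l with
  | nil => rfl
  | cons x xs ih =>
    rw [List.count_cons, List.filter_cons]
    by_cases hx : x = h
    · subst hx
      simp only [bne_self_eq_false, beq_self_eq_true, if_true]
      rw [if_neg Bool.false_ne_true]
      simp only [List.length_cons]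
      omega
    · have h1 : (x == h) = false := by simpa using hx
      have h2 : (x != h) = true := by simp [bne, h1]
      rw [h1, h2, if_pos rfl, if_neg Bool.false_ne_true]
      simp only [List.length_cons]
      omega

-- Counter's items in first-occurrence order coincide with B's partition-by-filter loop
theorem sw_main (ws : List String) :
    (PySem.Set.ofList ws).map (fun k => (k, (ws.count k : Int))) = swGo ws := by
  induction hn : ws.length using Nat.strong_induction_on generalizing ws with
  | _ n ih =>
    cases ws with
    | nil => simp [swGo]
    | cons h t =>
      have hrest : (h :: t).filter (fun w => w != h) = t.filter (fun w => w != h) := by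
        rw [List.filter_cons, bne_self_eq_false, if_neg Bool.false_ne_true]
      rw [sw_ofList_cons, swGo, hrest]
      simp only [List.map]
      congr 1
      · -- head entry: count h (h::t) = length (h::t) - length of the filtered rest
        have hc := sw_count_add_filter (h :: t) h
        rw [hrest] at hc
        simp only [Prod.mk.injEq, true_and]
        omega
      · -- tail: counts of keys ≠ h survive the filter
        have hn' : t.length + 1 = n := by simpa using hn
        have hrec := ih (t.filter (fun w => w != h)).length
          (by
            have := List.length_filter_le (fun w => w != h) t
            omega)
          (t.filter (fun w => w != h)) rfl
        rw [← hrec]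
        apply List.map_congr_left
        intro k hk
        have hkh : k ≠ h := by
          have hk' : k ∈ t.filter (fun w => w != h) :=
            (PySem.Set.mem_ofList _ _).mp hk
          simpa using (List.mem_filter.mp hk').2
        have hcnt : (t.filter (fun w => w != h)).count k = (h :: t).count k := by
          rw [List.count_filter (by simpa using hkh)]
          simp [Ne.symm hkh]
        rw [hcnt]

-- ===== VERDICT =====
theorem similar_words_spec : Claim_equal_similar_words := by
  intro arr _
  unfold Spec_similar_words similar_words similar_words_alt
  rw [sw_step_eq, sw_fold_eq_counter, PySem.Dict.items_counter, sw_main]
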